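-- pv_equiv track=rewrite | github.com/LorenzoAndrees/EDD | Tarea I/Análisis(conFaker).py | return_name
-- ===== SOURCE A (Python) =====
-- def return_name(string):
--     c = 0
--     n2 = str()
--     nfinal = [None]*2
--     for k in string:
--         if k == " ":
--             c+=1
--         if c ==2:
--                 break
--         n2 += k
--     nfinal[0],nfinal[1] = n2.split(" ")
--     return nfinal
-- ===== SOURCE B (Python) =====
-- def return_name(string):
--     first, rest = string.split(" ", 1)
--     second = rest.split(" ", 1)[0]
--     return [first, second]
-- ===== Notes on version B (the rewrite author's own statement) =====
-- stated objective: simpler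
-- what changed: The char-by-char loop with a space counter, accumulator string and break is replaced by split-based parsing: tuple-unpack string.split(' ', 1) into first word and remainder, then take the head of rest.split(' ', 1); counter, accumulator and break all disappear.
import Mathlib
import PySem

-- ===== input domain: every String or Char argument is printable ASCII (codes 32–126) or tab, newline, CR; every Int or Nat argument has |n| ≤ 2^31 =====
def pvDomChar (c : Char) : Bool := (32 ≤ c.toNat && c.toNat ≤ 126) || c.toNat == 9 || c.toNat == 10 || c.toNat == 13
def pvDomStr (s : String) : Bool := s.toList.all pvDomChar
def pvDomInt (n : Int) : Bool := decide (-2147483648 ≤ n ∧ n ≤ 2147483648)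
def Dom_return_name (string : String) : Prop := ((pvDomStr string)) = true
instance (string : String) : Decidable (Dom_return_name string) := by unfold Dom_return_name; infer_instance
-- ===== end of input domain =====

-- B replaces A's char-by-char space-counting loop (counter, accumulator, break) by split-based parsing: a simpler decomposition, same cost.

-- ===== PORT A =====
-- the for-loop of A: state is the space counter c and the accumulator n2; 'break' = return n2
def returnNameLoop : List Char → Nat → List Char → List Char
  | [], _, n2 => n2
  | k :: ks, c, n2 =>
    let c' := if k = ' ' then c + 1 else c
    if c' = 2 then n2 else returnNameLoop ks c' (n2 ++ [k])

def return_name (string : String) : List String :=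
  -- nfinal[0], nfinal[1] = n2.split(" "): the unpacking succeeds iff there are exactly two
  -- parts (otherwise Python raises ValueError; excluded by Pre_)
  let parts := PySem.Chars.splitOn (returnNameLoop string.toList 0 []) [' ']
  if parts.length = 2 then [String.ofList (parts.headD []), String.ofList (parts.tail.headD [])]
  else []

-- ===== PORT B =====
def return_name_alt (string : String) : List String :=
  -- first, rest = string.split(" ", 1): ValueError unless exactly two parts (excluded by Pre_)
  match PySem.Str.splitMax? string " " 1 with
  | some [first, rest] =>
    -- second = rest.split(" ", 1)[0]
    (match PySem.Str.splitMax? rest " " 1 with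
     | some (second :: _) => [first, second]
     | _ => [])
  | _ => []

-- ===== PRECONDITION & SPEC =====
-- Pre_ excludes exactly the strings containing no space: there A raises ValueError (unpacking a
-- one-element split into two variables), and B raises the same ValueError from its tuple unpacking.
def Pre_return_name (string : String) : Prop := ' ' ∈ string.toList
instance (string : String) : Decidable (Pre_return_name string) := by unfold Pre_return_name; infer_instance
def pvWitness_return_name : String := "John Smith"

def Spec_return_name (string : String) (out : List String) : Prop := out = return_name_alt string
instance (string : String) (out : List String) : Decidable (Spec_return_name string out) := by unfold Spec_return_name; infer_instance

-- ===== CLAIM (what is proved, stated in full; the proofs are below) =====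
def Claim_equal_return_name : Prop := ∀ (string : String), Dom_return_name string → Pre_return_name string → Spec_return_name string (return_name string)

-- ===== LEMMAS AND PROOFS =====

-- decomposition at the first space
theorem space_split (s : List Char) (h : ' ' ∈ s) :
    ∃ p q, ' ' ∉ p ∧ s = p ++ ' ' :: q := by
  induction s with
  | nil => cases h
  | cons c rest ih =>
    by_cases hc : c = ' '
    · exact ⟨[], rest, by simp, by simp [hc]⟩
    · have hm : ' ' ∈ rest := by
        cases List.mem_cons.mp h with
        | inl h' => exact absurd h'.symm hc
        | inr h' => exact h'
      obtain ⟨p, q, hp, hs⟩ := ih hm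
      exact ⟨c :: p, q, by simp [hp, Ne.symm hc], by simp [hs]⟩

theorem takeWhile_no_space (p q : List Char) (hp : ' ' ∉ p) :
    (p ++ ' ' :: q).takeWhile (fun x => decide (x ≠ ' ')) = p := by
  induction p with
  | nil => rw [List.nil_append, List.takeWhile_cons, if_neg (by simp)]
  | cons c p' ih =>
    have hc : c ≠ ' ' := fun h => hp (by simp [h])
    have hp' : ' ' ∉ p' := fun h => hp (by simp [h])
    rw [List.cons_append, List.takeWhile_cons, if_pos (by simp [hc]), ih hp']

theorem takeWhile_all (q : List Char) (hq : ' ' ∉ q) :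
    q.takeWhile (fun x => decide (x ≠ ' ')) = q := by
  apply List.takeWhile_eq_self_iff.mpr
  intro c hc
  simp
  exact fun h => hq (h ▸ hc)

-- A's loop, phase c = 0 (before the first space): just copies the prefix
theorem loop_phase0 (p : List Char) (hp : ' ' ∉ p) :
    ∀ rest n2, returnNameLoop (p ++ rest) 0 n2 = returnNameLoop rest 0 (n2 ++ p) := by
  induction p with
  | nil => simp
  | cons c p' ih =>
    intro rest n2
    have hc : c ≠ ' ' := fun h => hp (by simp [h])
    have hp' : ' ' ∉ p' := fun h => hp (by simp [h])
    simp [returnNameLoop, hc, ih hp']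

-- A's loop, phase c = 1 (after the first space): copies until the next space, then breaks
theorem loop_phase1 (q : List Char) :
    ∀ n2, returnNameLoop q 1 n2 = n2 ++ q.takeWhile (fun x => decide (x ≠ ' ')) := by
  induction q with
  | nil => simp [returnNameLoop]
  | cons c q' ih =>
    intro n2
    by_cases hc : c = ' '
    · simp [returnNameLoop, hc]
    · simp [returnNameLoop, hc, ih]

theorem loop_value (p q : List Char) (hp : ' ' ∉ p) :
    returnNameLoop (p ++ ' ' :: q) 0 []
      = p ++ ' ' :: q.takeWhile (fun x => decide (x ≠ ' ')) := by
  rw [loop_phase0 p hp]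
  have hstep : returnNameLoop (' ' :: q) 0 p = returnNameLoop q 1 (p ++ [' ']) := by
    simp [returnNameLoop]
  rw [List.nil_append, hstep, loop_phase1]
  simp

-- splitOn.go plumbing
theorem splitOn_go_nil (fuel : Nat) (cur : List Char) (acc : List (List Char)) :
    PySem.Chars.splitOn.go [' '] fuel [] cur acc = (cur.reverse :: acc).reverse := by
  cases fuel <;> simp [PySem.Chars.splitOn.go]

theorem splitOn_go_skip (p : List Char) (hp : ' ' ∉ p) :
    ∀ fuel l cur acc, PySem.Chars.splitOn.go [' '] (fuel + p.length) (p ++ l) cur acc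
      = PySem.Chars.splitOn.go [' '] fuel l (p.reverse ++ cur) acc := by
  induction p with
  | nil => simp
  | cons c p' ih =>
    intro fuel l cur acc
    have hc : c ≠ ' ' := fun h => hp (by simp [h])
    have hp' : ' ' ∉ p' := fun h => hp (by simp [h])
    have hfe : fuel + (c :: p').length = (fuel + p'.length) + 1 := by
      simp [List.length]; omega
    rw [hfe]
    simp only [List.cons_append]
    rw [show PySem.Chars.splitOn.go [' '] ((fuel + p'.length) + 1) (c :: (p' ++ l)) cur acc
        = PySem.Chars.splitOn.go [' '] (fuel + p'.length) (p' ++ l) (c :: cur) acc by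
      simp [PySem.Chars.splitOn.go, List.isPrefixOf, Ne.symm hc]]
    rw [ih hp']
    simp

theorem splitOn_go_skip_nil (p : List Char) (hp : ' ' ∉ p) (fuel : Nat) (cur : List Char)
    (acc : List (List Char)) :
    PySem.Chars.splitOn.go [' '] (fuel + p.length) p cur acc
      = PySem.Chars.splitOn.go [' '] fuel [] (p.reverse ++ cur) acc := by
  have h := splitOn_go_skip p hp fuel [] cur acc
  simpa using h

theorem splitOn_go_sep (fuel : Nat) (q cur : List Char) (acc : List (List Char)) :
    PySem.Chars.splitOn.go [' '] (fuel + 1) (' ' :: q) cur acc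
      = PySem.Chars.splitOn.go [' '] fuel q [] (cur.reverse :: acc) := by
  simp [PySem.Chars.splitOn.go, List.isPrefixOf]

theorem splitOn_two (p t : List Char) (hp : ' ' ∉ p) (ht : ' ' ∉ t) :
    PySem.Chars.splitOn (p ++ ' ' :: t) [' '] = [p, t] := by
  unfold PySem.Chars.splitOn
  rw [show (p ++ ' ' :: t).length + 1 = (((1 + t.length) + 1) + p.length) by
    simp [List.length_append]; omega]
  rw [splitOn_go_skip p hp, splitOn_go_sep, splitOn_go_skip_nil t ht, splitOn_go_nil]
  simp

-- splitOnMax.go plumbing (maxsplit = 1)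
theorem splitOnMax_go_nil (fuel m : Nat) (cur : List Char) (acc : List (List Char)) :
    PySem.Chars.splitOnMax.go [' '] fuel m [] cur acc = (cur.reverse :: acc).reverse := by
  cases fuel <;> simp [PySem.Chars.splitOnMax.go]

theorem splitOnMax_go_mzero (fuel : Nat) (l cur : List Char) (acc : List (List Char)) :
    PySem.Chars.splitOnMax.go [' '] fuel 0 l cur acc = ((cur.reverse ++ l) :: acc).reverse := by
  cases fuel with
  | zero => simp [PySem.Chars.splitOnMax.go]
  | succ n => cases l <;> simp [PySem.Chars.splitOnMax.go]

theorem splitOnMax_go_skip (p : List Char) (hp : ' ' ∉ p) (m : Nat) :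
    ∀ fuel l cur acc, PySem.Chars.splitOnMax.go [' '] (fuel + p.length) (m + 1) (p ++ l) cur acc
      = PySem.Chars.splitOnMax.go [' '] fuel (m + 1) l (p.reverse ++ cur) acc := by
  induction p with
  | nil => simp
  | cons c p' ih =>
    intro fuel l cur acc
    have hc : c ≠ ' ' := fun h => hp (by simp [h])
    have hp' : ' ' ∉ p' := fun h => hp (by simp [h])
    have hfe : fuel + (c :: p').length = (fuel + p'.length) + 1 := by
      simp [List.length]; omega
    rw [hfe]
    simp only [List.cons_append]
    rw [show PySem.Chars.splitOnMax.go [' '] ((fuel + p'.length) + 1) (m + 1) (c :: (p' ++ l)) cur acc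
        = PySem.Chars.splitOnMax.go [' '] (fuel + p'.length) (m + 1) (p' ++ l) (c :: cur) acc by
      simp [PySem.Chars.splitOnMax.go, List.isPrefixOf, Ne.symm hc]]
    rw [ih hp']
    simp

theorem splitOnMax_go_skip_nil (p : List Char) (hp : ' ' ∉ p) (m fuel : Nat) (cur : List Char)
    (acc : List (List Char)) :
    PySem.Chars.splitOnMax.go [' '] (fuel + p.length) (m + 1) p cur acc
      = PySem.Chars.splitOnMax.go [' '] fuel (m + 1) [] (p.reverse ++ cur) acc := by
  have h := splitOnMax_go_skip p hp m fuel [] cur acc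
  simpa using h

theorem splitOnMax_go_sep (fuel m : Nat) (q cur : List Char) (acc : List (List Char)) :
    PySem.Chars.splitOnMax.go [' '] (fuel + 1) (m + 1) (' ' :: q) cur acc
      = PySem.Chars.splitOnMax.go [' '] fuel m q [] (cur.reverse :: acc) := by
  simp [PySem.Chars.splitOnMax.go, List.isPrefixOf]

theorem splitOnMax_one_mem (p q : List Char) (hp : ' ' ∉ p) :
    PySem.Chars.splitOnMax (p ++ ' ' :: q) [' '] 1 = [p, q] := by
  unfold PySem.Chars.splitOnMax
  rw [if_neg (by norm_num)]
  rw [show ((1 : Int)).toNat = 0 + 1 from rfl]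
  rw [show (p ++ ' ' :: q).length + 1 = (((q.length + 1) + 1) + p.length) by
    simp [List.length_append]; omega]
  rw [splitOnMax_go_skip p hp, splitOnMax_go_sep, splitOnMax_go_mzero]
  simp

theorem splitOnMax_one_not_mem (q : List Char) (hq : ' ' ∉ q) :
    PySem.Chars.splitOnMax q [' '] 1 = [q] := by
  unfold PySem.Chars.splitOnMax
  rw [if_neg (by norm_num)]
  rw [show ((1 : Int)).toNat = 0 + 1 from rfl]
  rw [show q.length + 1 = 1 + q.length by omega]
  rw [splitOnMax_go_skip_nil q hq, splitOnMax_go_nil]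
  simp

theorem str_splitMax_eq (s : String) (parts : List (List Char))
    (h : PySem.Chars.splitOnMax s.toList [' '] 1 = parts) :
    ∃ l : List String, PySem.Str.splitMax? s " " 1 = some l ∧ l.map String.toList = parts := by
  have hb := PySem.Str.splitMax?_map s " " 1
  rw [show (" " : String).toList = [' '] from rfl] at hb
  rw [show PySem.Chars.splitMax? s.toList [' '] 1
      = some (PySem.Chars.splitOnMax s.toList [' '] 1) by simp [PySem.Chars.splitMax?], h] at hb
  cases ho : PySem.Str.splitMax? s " " 1 with
  | none => rw [ho] at hb; simp at hb
  | some l =>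
    rw [ho] at hb
    simp at hb
    exact ⟨l, rfl, hb⟩

-- ===== VERDICT (by name: the statement is the Claim_ definition above) =====
theorem return_name_spec : Claim_equal_return_name := by
  intro string _ hpre
  unfold Spec_return_name
  obtain ⟨p, q, hp, hs⟩ := space_split string.toList hpre
  set t := q.takeWhile (fun x => decide (x ≠ ' ')) with ht
  have htns : ' ' ∉ t := by
    intro hm
    have := List.mem_takeWhile_imp hm
    simp at this
  -- A's value
  have hA : return_name string = [String.ofList p, String.ofList t] := by
    simp only [return_name]
    rw [hs, loop_value p q hp, ← ht, splitOn_two p t hp htns]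
    simp
  -- B's value, outer split
  have hsplit1 : PySem.Chars.splitOnMax string.toList [' '] 1 = [p, q] := by
    rw [hs]; exact splitOnMax_one_mem p q hp
  obtain ⟨l, hl, hlm⟩ := str_splitMax_eq string [p, q] hsplit1
  obtain ⟨f, r, rfl⟩ : ∃ a b, l = [a, b] := by
    match l, hlm with
    | [a, b], _ => exact ⟨a, b, rfl⟩
  simp only [List.map_cons, List.map_nil, List.cons.injEq, and_true] at hlm
  obtain ⟨hf, hr⟩ := hlm
  -- B's value, inner split
  have hsplit2 : ∃ tl, PySem.Chars.splitOnMax r.toList [' '] 1 = t :: tl := by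
    by_cases hq : ' ' ∈ q
    · obtain ⟨q1, q2, hq1, hqeq⟩ := space_split q hq
      have ht1 : t = q1 := by rw [ht, hqeq]; exact takeWhile_no_space q1 q2 hq1
      exact ⟨[q2], by rw [hr, hqeq, splitOnMax_one_mem q1 q2 hq1, ht1]⟩
    · have ht1 : t = q := by rw [ht]; exact takeWhile_all q hq
      exact ⟨[], by rw [hr, splitOnMax_one_not_mem q hq, ht1]⟩
  obtain ⟨tl, hsplit2⟩ := hsplit2
  obtain ⟨l2, hl2, hlm2⟩ := str_splitMax_eq r (t :: tl) hsplit2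
  obtain ⟨s2, rest2, rfl⟩ : ∃ a b, l2 = a :: b := by
    match l2, hlm2 with
    | a :: b, _ => exact ⟨a, b, rfl⟩
  simp only [List.map_cons, List.cons.injEq] at hlm2
  have hB : return_name_alt string = [f, s2] := by
    simp [return_name_alt, hl, hl2]
  rw [hA, hB]
  have hfe : f = String.ofList p := by rw [← hf]; simp
  have hse : s2 = String.ofList t := by rw [← hlm2.1]; simp
  rw [hfe, hse]
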